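-- pv_equiv track=rewrite | github.com/ArslanTu/LeetCode | 2255.统计是给定字符串前缀的字符串数目.py | countPrefixes
-- ===== SOURCE A (Python) =====
-- from typing import List
--
-- def countPrefixes(words: List[str], s: str) -> int:
--     preSet = set()
--     for i in range(len(s)):
--         preSet.add(s[0:i + 1])
--     ans = 0
--     for word in words:
--         if word in preSet: ans += 1
--     return ans
-- ===== SOURCE B (Python) =====
-- from typing import List
--
-- def countPrefixes(words: List[str], s: str) -> int:
--     cnt = {}
--     for word in words:
--         cnt[word] = cnt.get(word, 0) + 1
--     ans = 0
--     for i in range(len(s)):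
--         ans += cnt.get(s[:i + 1], 0)
--     return ans
-- ===== Notes on version B (the rewrite author's own statement) =====
-- stated objective: alternative
-- what changed: Inverted the indexing: instead of materialising the set of all prefixes of s and scanning the word list for membership, B builds a frequency dict of the words once and then scans the prefixes of s, summing each prefix's multiplicity.
import Mathlib
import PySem

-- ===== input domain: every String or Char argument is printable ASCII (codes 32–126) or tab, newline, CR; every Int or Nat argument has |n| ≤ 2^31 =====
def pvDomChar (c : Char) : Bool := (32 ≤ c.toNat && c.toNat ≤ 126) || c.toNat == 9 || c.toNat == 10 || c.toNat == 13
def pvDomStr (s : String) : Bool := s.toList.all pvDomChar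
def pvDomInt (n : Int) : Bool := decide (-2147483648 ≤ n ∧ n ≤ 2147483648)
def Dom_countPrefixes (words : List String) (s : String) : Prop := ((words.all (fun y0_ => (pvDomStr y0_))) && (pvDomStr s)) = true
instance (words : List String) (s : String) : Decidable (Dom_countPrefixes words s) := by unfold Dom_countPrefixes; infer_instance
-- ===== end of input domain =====

-- B replaces A's prefix-set + word scan by a word-frequency dict + prefix scan, avoiding the materialised set of all prefixes.

-- ===== PORT A =====
def countPrefixes (words : List String) (s : String) : Int :=
  let preSet : PySem.Set String :=
    (PySem.List.pyRange 0 (PySem.Str.len s) 1).foldl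
      (fun st i => PySem.Set.add st (PySem.Str.slice s (some 0) (some (i + 1))))
      PySem.Set.empty
  words.foldl (fun ans word => if PySem.Set.contains preSet word then ans + 1 else ans) 0

-- ===== PORT B =====
def countPrefixes_alt (words : List String) (s : String) : Int :=
  let cnt : PySem.Dict String Int :=
    words.foldl (fun d word => d.modify word 0 (· + 1)) PySem.Dict.empty
  (PySem.List.pyRange 0 (PySem.Str.len s) 1).foldl
    (fun ans i => ans + cnt.getD (PySem.Str.slice s none (some (i + 1))) 0)
    0

-- ===== PRECONDITION & SPEC =====
def Spec_countPrefixes (words : List String) (s : String) (out : Int) : Prop := out = countPrefixes_alt words s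
instance (words : List String) (s : String) (out : Int) : Decidable (Spec_countPrefixes words s out) := by unfold Spec_countPrefixes; infer_instance

-- ===== CLAIM (what is proved, stated in full; the proofs are below) =====
def Claim_equal_countPrefixes : Prop := ∀ (words : List String) (s : String), Dom_countPrefixes words s → Spec_countPrefixes words s (countPrefixes words s)

-- ===== LEMMAS AND PROOFS =====



-- Summing a 0/1 indicator over a duplicate-free list is a membership test.
theorem pvIndicator (w : String) (L : List String) (hL : L.Nodup) :
    (L.map (fun p => if p = w then (1 : Int) else 0)).sum
      = if w ∈ L then 1 else 0 := by
  induction L with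
  | nil => simp
  | cons x xs ih =>
    have hx : x ∉ xs := (List.nodup_cons.mp hL).1
    have ihx := ih (List.Nodup.of_cons hL)
    by_cases h : x = w
    · subst h
      simp [ihx, if_neg hx]
    · simp [h, ihx, Ne.symm h]

-- A's word loop counts the words contained in the set.
theorem pvFoldA (P : PySem.Set String) (words : List String) (a : Int) :
    words.foldl (fun ans word => if PySem.Set.contains P word then ans + 1 else ans) a
      = a + (words.countP (fun w => PySem.Set.contains P w) : Int) := by
  induction words generalizing a with
  | nil => simp
  | cons w ws ih =>
    simp only [List.foldl_cons, List.countP_cons, ih]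
    simp only [PySem.Set.contains, List.contains_iff_mem]
    split_ifs <;> push_cast <;> omega

-- The prefix list is duplicate-free, so summing word-multiplicities over it
-- counts the words that occur in it.
theorem pvSumCount (L : List String) (hL : L.Nodup) (words : List String) :
    (L.map (fun p => (words.count p : Int))).sum
      = (words.countP (fun w => decide (w ∈ L)) : Int) := by
  induction words with
  | nil => simp
  | cons w ws ih =>
    have hcount : ∀ p : String, (w :: ws).count p = ws.count p + (if p = w then 1 else 0) := by
      intro p
      by_cases h : p = w
      · subst h; simp [List.count_cons_self]
      · rw [List.count_cons]
        simp [Ne.symm h, h]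
    have hsplit :
        (L.map (fun p => ((w :: ws).count p : Int))).sum
          = (L.map (fun p => (ws.count p : Int))).sum
            + (L.map (fun p => if p = w then (1 : Int) else 0)).sum := by
      rw [← List.sum_map_add]
      refine congrArg List.sum (List.map_congr_left ?_)
      intro p _
      rw [hcount p]
      push_cast
      split <;> simp
    rw [hsplit, pvIndicator w L hL, ih, List.countP_cons]
    by_cases h : w ∈ L <;> simp [h]

theorem countPrefixes_spec : Claim_equal_countPrefixes := by
  intro words s _
  unfold Spec_countPrefixes
  have hslice : ∀ i : Int, PySem.Str.slice s (some 0) (some (i + 1))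
      = PySem.Str.slice s none (some (i + 1)) := by
    intro i
    rw [← String.toList_inj]
    simp [PySem.Str.toList_slice, PySem.Chars.slice_eq_listSlice]
  have hnodup :
      ((PySem.List.pyRange 0 (PySem.Str.len s) 1).map
        (fun i => PySem.Str.slice s none (some (i + 1)))).Nodup := by
    refine List.Nodup.map_on ?_ (PySem.List.nodup_pyRange_one 0 (PySem.Str.len s))
    intro i hi j hj hfe
    rw [PySem.List.mem_pyRange_one, PySem.Str.len_eq] at hi hj
    rw [← String.toList_inj] at hfe
    simp only [PySem.Str.toList_slice, PySem.Chars.slice_eq_listSlice] at hfe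
    rw [PySem.List.slice_to s.toList (show (0:Int) ≤ i + 1 by omega), PySem.List.slice_to s.toList (show (0:Int) ≤ j + 1 by omega)] at hfe
    have hlen := congrArg List.length hfe
    simp only [List.length_take] at hlen
    omega
  -- A's value: the number of words that occur among the prefixes of s
  have hA : countPrefixes words s
      = (words.countP (fun w => decide (w ∈ (PySem.List.pyRange 0 (PySem.Str.len s) 1).map
          (fun i => PySem.Str.slice s none (some (i + 1))))) : Int) := by
    unfold countPrefixes
    have hset : (PySem.List.pyRange 0 (PySem.Str.len s) 1).foldl
        (fun st i => PySem.Set.add st (PySem.Str.slice s (some 0) (some (i + 1))))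
        PySem.Set.empty
        = PySem.Set.ofList ((PySem.List.pyRange 0 (PySem.Str.len s) 1).map
            (fun i => PySem.Str.slice s none (some (i + 1)))) := by
      rw [PySem.Set.ofList_eq_foldl, List.foldl_map]
      simp only [hslice]
      rfl
    rw [hset, pvFoldA]
    rw [List.countP_congr (fun w _ => ?_)]
    · ring
    · simp [PySem.Set.contains, List.contains_eq_mem, PySem.Set.mem_ofList]
  -- B's value: the sum, over the prefixes of s, of each prefix's multiplicity in words
  have hB : countPrefixes_alt words s
      = (((PySem.List.pyRange 0 (PySem.Str.len s) 1).map
          (fun i => PySem.Str.slice s none (some (i + 1)))).map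
            (fun p => (words.count p : Int))).sum := by
    unfold countPrefixes_alt
    rw [PySem.List.foldl_add]
    simp only [PySem.Dict.getD_foldl_modify_add_one, PySem.Dict.getD_empty, List.map_map]
    ring_nf
    rfl
  rw [hA, hB, pvSumCount _ hnodup words]
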